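-- pv_equiv track=rewrite | github.com/harditsandhu02/Python_Projects | lab10.py | similarityAnalysis
-- ===== SOURCE A (Python) =====
-- def similarityAnalysis(paragraph1, paragraph2):
--     # converting the lists into sets
--     unique_words1 = set(paragraph1)
--     unique_words2 = set(paragraph2)
--
--     # creating a empty dictionary
--     words_dict1 = {}
--     # first for loop to go through list 1
--     for word in unique_words1:
--         # first for loop to go through list 2
--         for word2 in unique_words2:
--             # if the words match
--             if word == word2:
--                 # create a list with the amount in each list
--                 new = [paragraph1.count(word),paragraph2.count(word2)]
--                 # adding the values to the dictionary with a key
--                 words_dict1[word] = new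
--
--     # retuing the set to be used by other functions
--     return(words_dict1)
-- ===== SOURCE B (Python) =====
-- def similarityAnalysis(paragraph1, paragraph2):
--     # one-pass frequency tables instead of nested scans with repeated .count
--     counts1 = {}
--     for w in paragraph1:
--         counts1[w] = counts1.get(w, 0) + 1
--     counts2 = {}
--     for w in paragraph2:
--         counts2[w] = counts2.get(w, 0) + 1
--     return {w: [n, counts2[w]] for w, n in counts1.items() if w in counts2}
-- ===== Notes on version B (the rewrite author's own statement) =====
-- stated objective: faster
-- what changed: Replaces the nested scan over the two sets with repeated list.count calls by two one-pass frequency dictionaries and a single comprehension joining them.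
import Mathlib
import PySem

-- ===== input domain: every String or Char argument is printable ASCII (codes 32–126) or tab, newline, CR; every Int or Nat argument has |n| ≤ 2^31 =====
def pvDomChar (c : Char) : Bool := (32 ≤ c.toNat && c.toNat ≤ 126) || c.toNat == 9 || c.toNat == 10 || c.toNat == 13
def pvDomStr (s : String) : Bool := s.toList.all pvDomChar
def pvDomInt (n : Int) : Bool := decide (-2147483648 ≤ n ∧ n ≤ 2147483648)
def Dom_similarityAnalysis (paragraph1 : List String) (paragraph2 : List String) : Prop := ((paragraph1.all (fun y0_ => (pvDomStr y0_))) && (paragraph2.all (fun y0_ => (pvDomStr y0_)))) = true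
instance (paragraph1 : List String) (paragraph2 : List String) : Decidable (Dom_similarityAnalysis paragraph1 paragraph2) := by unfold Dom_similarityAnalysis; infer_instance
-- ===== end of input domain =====

-- B replaces A's nested scan over the two sets (with repeated list.count calls) by two
-- one-pass frequency dictionaries joined in a single pass; equivalence is about the
-- returned dict (compared as a dict; Python's set-iteration order is not observable there).

-- ===== PORT A =====
-- literal transliteration of A: sets of both lists, nested loops over the sets,
-- insert [paragraph1.count(word), paragraph2.count(word2)] on a match, return the dict
def similarityAnalysis (paragraph1 : List String) (paragraph2 : List String) : List (String × List Int) :=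
  let unique_words1 : PySem.Set String := PySem.Set.ofList paragraph1
  let unique_words2 : PySem.Set String := PySem.Set.ofList paragraph2
  let words_dict1 : PySem.Dict String (List Int) :=
    unique_words1.foldl (fun d word =>
      unique_words2.foldl (fun d word2 =>
        if word == word2 then
          d.insert word [((PySem.List.count paragraph1 word : Nat) : Int),
                         ((PySem.List.count paragraph2 word2 : Nat) : Int)]
        else d) d) PySem.Dict.empty
  words_dict1.items

-- ===== PORT B =====
-- literal transliteration of B: two counting loops, then the dict comprehension
-- {w: [n, counts2[w]] for w, n in counts1.items() if w in counts2}
def similarityAnalysis_alt (paragraph1 : List String) (paragraph2 : List String) : List (String × List Int) :=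
  let counts1 : PySem.Dict String Int :=
    paragraph1.foldl (fun d w => d.insert w (d.getD w 0 + 1)) PySem.Dict.empty
  let counts2 : PySem.Dict String Int :=
    paragraph2.foldl (fun d w => d.insert w (d.getD w 0 + 1)) PySem.Dict.empty
  let res : PySem.Dict String (List Int) :=
    counts1.items.foldl (fun d p =>
      if counts2.contains p.1 then d.insert p.1 [p.2, counts2.getD p.1 0] else d)
      PySem.Dict.empty
  res.items

-- ===== PRECONDITION & SPEC =====
def Spec_similarityAnalysis (paragraph1 : List String) (paragraph2 : List String) (out : List (String × List Int)) : Prop := out = similarityAnalysis_alt paragraph1 paragraph2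
instance (paragraph1 : List String) (paragraph2 : List String) (out : List (String × List Int)) : Decidable (Spec_similarityAnalysis paragraph1 paragraph2 out) := by unfold Spec_similarityAnalysis; infer_instance

-- ===== CLAIM (what is proved, stated in full; the proofs are below) =====
def Claim_equal_similarityAnalysis : Prop := ∀ (paragraph1 : List String) (paragraph2 : List String), Dom_similarityAnalysis paragraph1 paragraph2 → Spec_similarityAnalysis paragraph1 paragraph2 (similarityAnalysis paragraph1 paragraph2)

-- ===== LEMMAS AND PROOFS =====

-- a fold that updates only when P holds is the fold over the filtered list
theorem foldl_if_filter {α β : Type} (P : α → Bool) (f : β → α → β) :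
    ∀ (l : List α) (d : β),
      l.foldl (fun d x => if P x then f d x else d) d = (l.filter P).foldl f d := by
  intro l
  induction l with
  | nil => intro d; rfl
  | cons x xs ih =>
    intro d
    by_cases h : P x = true <;> simp [h, ih]

-- on a Nodup list, filtering for equality with a fixed element yields [word] or []
theorem filter_beq_of_nodup {α : Type} [BEq α] [LawfulBEq α] (word : α) :
    ∀ (l : List α), l.Nodup →
      l.filter (fun x => word == x) = (if word ∈ l then [word] else []) := by
  intro l
  induction l with
  | nil => intro _; simp
  | cons x xs ih =>
    intro hnd
    rcases List.nodup_cons.mp hnd with ⟨hx, hnd'⟩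
    by_cases h : word = x
    · subst h
      have hnone : List.filter (fun x => word == x) xs = [] :=
        List.filter_eq_nil_iff.mpr (fun a ha hba => hx ((eq_of_beq hba) ▸ ha))
      simp [hx, hnone]
    · simp [h, ih hnd']

-- A's inner loop over the set of paragraph2 is a single conditional insert
theorem inner_loop_eq {ν : Type} (u2 : List String) (word : String) (v : String → ν)
    (hnd : u2.Nodup) (d : PySem.Dict String ν) :
    u2.foldl (fun d word2 => if word == word2 then d.insert word (v word2) else d) d
      = if u2.contains word then d.insert word (v word) else d := by
  rw [foldl_if_filter, filter_beq_of_nodup word u2 hnd]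
  by_cases h : word ∈ u2 <;> simp [h]

-- both sides rewritten to the same filtered-map form
theorem ports_eq (p1 p2 : List String) :
    similarityAnalysis p1 p2 = similarityAnalysis_alt p1 p2 := by
  unfold similarityAnalysis similarityAnalysis_alt
  simp only []
  -- A side: collapse the inner loop, then the conditional outer loop
  have hA1 :
      (fun (d : PySem.Dict String (List Int)) (word : String) =>
        (PySem.Set.ofList p2).foldl (fun d word2 =>
          if word == word2 then
            d.insert word [((PySem.List.count p1 word : Nat) : Int),
                           ((PySem.List.count p2 word2 : Nat) : Int)]
          else d) d)
      = (fun d word =>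
          if (PySem.Set.ofList p2).contains word then
            d.insert word [((PySem.List.count p1 word : Nat) : Int),
                           ((PySem.List.count p2 word : Nat) : Int)]
          else d) := by
    funext d word
    exact inner_loop_eq (PySem.Set.ofList p2) word
      (fun word2 => [((PySem.List.count p1 word : Nat) : Int),
                     ((PySem.List.count p2 word2 : Nat) : Int)])
      (PySem.Set.nodup_ofList p2) d
  rw [hA1, foldl_if_filter, PySem.Dict.items_foldl_insert_fresh _ (fun w => w) _ _
        (fun a _ => rfl)
        (by simpa using ((PySem.Set.nodup_ofList p1).filter _))]
  -- B side
  rw [PySem.Dict.foldl_insert_getD_add_one_eq_counter,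
      PySem.Dict.foldl_insert_getD_add_one_eq_counter,
      foldl_if_filter]
  have hB := PySem.Dict.items_foldl_insert_fresh
      (l := (PySem.Dict.counter p1).items.filter
              (fun p => (PySem.Dict.counter p2).contains p.1))
      (k := fun p => p.1)
      (v := fun p => [p.2, (PySem.Dict.counter p2).getD p.1 0])
      PySem.Dict.empty
      (fun a _ => rfl)
      (by
        have h1 : ((PySem.Dict.counter p1).items.filter
            (fun p => (PySem.Dict.counter p2).contains p.1)).map (fun p => p.1)
            |>.Sublist ((PySem.Dict.counter p1).items.map (fun p => p.1)) :=
          List.filter_sublist.map _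
        have h2 : ((PySem.Dict.counter p1).items.map (fun p => p.1)).Nodup := by
          simpa [PySem.Dict.keys] using PySem.Dict.nodup_keys_counter p1
        exact h2.sublist h1)
  rw [hB]
  -- both are now '[] ++ map … (filter …)': align them
  simp only [PySem.Dict.items_counter, List.filter_map, List.map_map]
  refine congrArg _ ?_
  have hpred : ∀ w ∈ PySem.Set.ofList p1,
      ((fun p => (PySem.Dict.counter p2).contains p.1) ∘ fun k => (k, (List.count k p1 : Int))) w
        = (PySem.Set.ofList p2).contains w := by
    intro w _
    simp [Function.comp, pysem]
  rw [List.filter_congr hpred]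
  apply List.map_congr_left
  intro w _
  simp [Function.comp, pysem]

-- ===== VERDICT (by name: the statement is the Claim_ definition above) =====
theorem similarityAnalysis_spec : Claim_equal_similarityAnalysis := by
  intro p1 p2 _
  unfold Spec_similarityAnalysis
  exact ports_eq p1 p2
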